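-- pv_equiv track=rewrite | github.com/kingofdelphi/datamining | cn2/cn2.py | maximal
-- ===== SOURCE A (Python) =====
-- def maximal(star):
--     res = []
--     for i in range(len(star)):
--         for j in range(i + 1, len(star)):
--             if sum(k in star[j] for k in star[i]) == len(star[i]):
--                 break
--         else:
--             res.append(star[i])
--     return res
-- ===== SOURCE B (Python) =====
-- def maximal(star):
--     kept = []
--     for e in reversed(star):
--         if not any(all(k in m for k in e) for m in kept):
--             kept.append(e)
--     return kept[::-1]
-- ===== Notes on version B (the rewrite author's own statement) =====
-- stated objective: faster
-- what changed: Right-to-left single pass keeping an accumulator of maximal elements and testing subsetness only against already-kept elements (valid by transitivity of subset), instead of comparing every element against its whole suffix.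
import Mathlib
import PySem

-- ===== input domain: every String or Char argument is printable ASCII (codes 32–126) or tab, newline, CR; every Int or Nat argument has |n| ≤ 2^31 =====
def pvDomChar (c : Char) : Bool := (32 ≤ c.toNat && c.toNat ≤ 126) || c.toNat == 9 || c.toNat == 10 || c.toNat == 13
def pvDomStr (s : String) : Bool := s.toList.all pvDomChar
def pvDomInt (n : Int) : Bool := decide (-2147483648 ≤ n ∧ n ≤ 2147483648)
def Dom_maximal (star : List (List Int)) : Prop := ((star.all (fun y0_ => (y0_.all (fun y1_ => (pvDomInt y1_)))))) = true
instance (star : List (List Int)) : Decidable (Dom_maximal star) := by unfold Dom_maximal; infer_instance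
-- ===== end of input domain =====

-- B may differ from A only in strategy: single right-to-left pass with an accumulator of kept maximal elements.

-- ===== PORT A =====
-- sum(k in star[j] for k in star[i]) == len(star[i])
def sumcondA (x y : List Int) : Bool := (x.filter (fun k => y.contains k)).length == x.length
-- inner 'for j' loop: true = 'break' fired (some later element dominates x)
def loopA (x : List Int) : List (List Int) → Bool
  | [] => false
  | y :: ys => if sumcondA x y then true else loopA x ys
-- outer 'for i' loop over star, comparing star[i] against the suffix star[i+1:]
def maximal : List (List Int) → List (List Int)
  | [] => []
  | x :: xs => if loopA x xs then maximal xs else x :: maximal xs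

-- ===== PORT B =====
def subB (e m : List Int) : Bool := e.all (fun k => m.contains k)
def stepB (kept : List (List Int)) (e : List Int) : List (List Int) :=
  if kept.any (fun m => subB e m) then kept else kept ++ [e]
def maximal_alt (star : List (List Int)) : List (List Int) :=
  ((star.reverse).foldl stepB []).reverse

-- ===== PRECONDITION & SPEC =====
def Spec_maximal (star : List (List Int)) (out : List (List Int)) : Prop := out = maximal_alt star
instance (star : List (List Int)) (out : List (List Int)) : Decidable (Spec_maximal star out) := by unfold Spec_maximal; infer_instance

-- ===== CLAIM (what is proved, stated in full; the proofs are below) =====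
def Claim_equal_maximal : Prop := ∀ (star : List (List Int)), Dom_maximal star → Spec_maximal star (maximal star)

-- ===== LEMMAS AND PROOFS =====

lemma sumcondA_eq_subB (x y : List Int) : sumcondA x y = subB x y := by
  have : (sumcondA x y = true) ↔ (subB x y = true) := by
    simp [sumcondA, subB, List.length_filter_eq_length_iff]
  cases hx : sumcondA x y <;> cases hy : subB x y <;> simp_all

lemma loopA_eq_any (x : List Int) (l : List (List Int)) :
    loopA x l = l.any (fun y => subB x y) := by
  induction l with
  | nil => rfl
  | cons y ys ih =>
    simp only [loopA, List.any_cons, sumcondA_eq_subB]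
    by_cases h : subB x y = true <;> simp [h, ih]

lemma subB_trans {a b c : List Int} (h1 : subB a b = true) (h2 : subB b c = true) :
    subB a c = true := by
  simp only [subB, List.all_eq_true] at *
  intro k hk
  have := h1 k hk
  simp only [List.contains_iff_mem] at this ⊢
  exact List.contains_iff_mem.mp (h2 _ this)

lemma any_maximal (xs : List (List Int)) (e : List Int) :
    (maximal xs).any (fun m => subB e m) = xs.any (fun m => subB e m) := by
  induction xs with
  | nil => rfl
  | cons x xs ih =>
    simp only [maximal, loopA_eq_any]
    by_cases h : xs.any (fun y => subB x y) = true
    · simp only [h, if_true, List.any_cons, ih]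
      by_cases he : subB e x = true
      · -- e ⊆ x and x ⊆ some y ∈ xs, so e ⊆ that y
        simp only [List.any_eq_true] at h
        obtain ⟨y, hy, hxy⟩ := h
        have : xs.any (fun m => subB e m) = true :=
          List.any_eq_true.mpr ⟨y, hy, subB_trans he hxy⟩
        simp [he, this]
      · simp only [Bool.not_eq_true] at he
        simp [he]
    · simp only [Bool.not_eq_true] at h
      simp [h, List.any_cons, ih]

lemma foldB_eq (xs : List (List Int)) :
    (xs.reverse).foldl stepB [] = (maximal xs).reverse := by
  induction xs with
  | nil => rfl
  | cons x xs ih =>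
    simp only [List.reverse_cons, List.foldl_append, ih, List.foldl_cons, List.foldl_nil]
    simp only [stepB, List.any_reverse, any_maximal, maximal, loopA_eq_any]
    by_cases h : xs.any (fun y => subB x y) = true <;> simp [h]

-- ===== VERDICT (by name: the statement is the Claim_ definition above) =====
theorem maximal_spec : Claim_equal_maximal := by
  intro star _
  show maximal star = maximal_alt star
  rw [maximal_alt, foldB_eq, List.reverse_reverse]
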